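-- pv_equiv track=rewrite | github.com/mcodnjs/21W-CodeTest-Study | mcodnjs/week1/프렌즈4블록.py | func
-- ===== SOURCE A (Python) =====
-- def func(m, n, board, cnt):
--
--     for i in range(0,m): # string -> list
--         board[i] = list(board[i])
--
--     x, y = [], []
--     for i in range(0,m-1):
--         for j in range(0,n-1):
--             target = board[i][j]
--             if target == "1":   continue # 비어있는 칸 break 안됨
--             if target == board[i][j+1] and target == board[i+1][j] and target == board[i+1][j+1]:
--                 # target == Right == Down == Right Down
--                 x.append(i)
--                 y.append(j)
--
--     if len(x) == 0 and len(y) == 0: # 더이상 2x2 로 같은 칸이 없다면 종료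
--         return board, cnt, False
--
--     for i in range(len(x)): # 2x2 0으로 세팅
--         board[x[i]][y[i]] = "0"
--         board[x[i]][y[i]+1] = "0"
--         board[x[i]+1][y[i]] = "0"
--         board[x[i]+1][y[i]+1] = "0"
--
--     for i in range(m): # 0 개수
--         cnt += board[i].count("0")
--
--     # 행, 열 transpose algorithm
--     board.reverse()
--     horizontal, vertical = [], []
--     for j in range(n):
--         vertical = []
--         for i in range(m):
--             vertical.append(board[i][j])
--         horizontal.append(vertical)
--
--     # list에서 0 삭제하고 1(비어있음)로 채움 -> 실제 블록이 내려가는 형태로 구현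
--     for i in range(n):
--         while "0" in horizontal[i]: horizontal[i].remove("0")
--         while len(horizontal[i]) < m: horizontal[i].append("1")
--
--     # 행, 열 transpose algorithm
--     result = []
--     for i in range(m):
--         vertical = []
--         for j in range(n):
--             vertical.append(horizontal[j][i])
--         result.append(vertical)
--     result.reverse()
--
--     for i in range(0,m): # string -> list
--         result[i] = ''.join(result[i])
--     return result, cnt, True
-- ===== SOURCE B (Python) =====
-- def func(m, n, board, cnt):
--     grid = [list(row) for row in board]
--     removed = set()
--     for i in range(m - 1):
--         for j in range(n - 1):
--             c = grid[i][j]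
--             if c != "1" and c == grid[i][j + 1] == grid[i + 1][j] == grid[i + 1][j + 1]:
--                 removed.update([(i, j), (i, j + 1), (i + 1, j), (i + 1, j + 1)])
--     if not removed:
--         return board, cnt, False
--     grid = [["0" if (i, j) in removed else grid[i][j] for j in range(n)] for i in range(m)]
--     cnt += sum(row.count("0") for row in grid)
--     cols = []
--     for j in range(n):
--         keep = [grid[i][j] for i in range(m - 1, -1, -1) if grid[i][j] != "0"]
--         cols.append(keep + ["1"] * (m - len(keep)))
--     result = ["".join(cols[j][m - 1 - i] for j in range(n)) for i in range(m)]
--     return result, cnt, True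
-- ===== Notes on version B (the rewrite author's own statement) =====
-- stated objective: simpler
-- what changed: B collects all four cells of every 2x2 match into one set and rebuilds the board functionally (per-column bottom-up gravity by direct index arithmetic) instead of A's parallel x/y coordinate lists, in-place cell writes, board.reverse plus two explicit transpose passes and repeated list.remove loops; return value only: A also mutates/reverses the board argument in place, B does not.
-- outside the precondition, e.g. on func(2, 2, ['aa0', 'aa0'], 0): A returns (['11', '11'], 6, True), B returns (['11', '11'], 4, True)
import Mathlib
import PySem

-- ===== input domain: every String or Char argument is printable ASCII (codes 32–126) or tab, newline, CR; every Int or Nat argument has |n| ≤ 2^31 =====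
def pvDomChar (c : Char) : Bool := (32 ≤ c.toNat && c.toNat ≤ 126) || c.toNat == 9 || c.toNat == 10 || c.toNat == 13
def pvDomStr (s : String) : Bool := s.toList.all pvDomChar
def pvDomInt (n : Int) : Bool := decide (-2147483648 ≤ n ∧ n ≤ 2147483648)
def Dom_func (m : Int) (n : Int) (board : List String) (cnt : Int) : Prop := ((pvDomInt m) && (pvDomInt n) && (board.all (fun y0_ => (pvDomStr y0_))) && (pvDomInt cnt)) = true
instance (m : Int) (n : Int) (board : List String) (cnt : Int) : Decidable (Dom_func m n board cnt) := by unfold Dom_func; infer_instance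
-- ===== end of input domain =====

-- One round of Friends-4-Block match-and-drop. B replaces A's x/y coordinate lists, in-place
-- writes, board.reverse and double transpose by a set of matched cells and functional per-column
-- gravity (simpler); return value only: Python A mutates/reverses its board argument, B does not.


-- ===== PORT A =====
-- board[i][j] on the char-list grid (indices are nonnegative Python ints, rendered as Nat)
def pvCellA (g : List (List Char)) (i j : Nat) : Char := (g.getD i []).getD j ' '
-- board[i][j] = "0"
def pvSetA (g : List (List Char)) (i j : Nat) : List (List Char) := g.modify i (fun row => row.set j '0')
-- while "0" in l: l.remove("0")   (fuel = initial length bounds the number of removals)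
def pvRemZeroA : Nat → List Char → List Char
  | 0, l => l
  | f + 1, l =>
    match PySem.List.remove? l '0' with
    | none => l
    | some l' => pvRemZeroA f l'
-- while len(l) < mm: l.append("1")
def pvPadA (mm : Nat) (l : List Char) : List Char :=
  if l.length < mm then pvPadA mm (l ++ ['1']) else l
  termination_by mm - l.length
  decreasing_by simp; omega

def func (m : Int) (n : Int) (board : List String) (cnt : Int) : List String × Int × Bool :=
  -- for i in range(0,m): board[i] = list(board[i])   (on the intended inputs m = len(board))
  let g0 : List (List Char) := board.map String.toList
  -- nested scan collecting the top-left corner of every 2x2 match (x/y kept as one pair list)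
  let xy : List (Nat × Nat) :=
    (List.range (m - 1).toNat).foldl (fun acc i =>
      (List.range (n - 1).toNat).foldl (fun acc j =>
        let t := pvCellA g0 i j
        if t = '1' then acc
        else if t = pvCellA g0 i (j + 1) ∧ t = pvCellA g0 (i + 1) j ∧ t = pvCellA g0 (i + 1) (j + 1) then
          acc ++ [(i, j)]
        else acc) acc) []
  if xy = [] then (board, cnt, false)   -- Python returns the board of char-lists here (out of the declared type unless board = [])
  else
    -- for each recorded corner set the four cells to "0"
    let g1 := xy.foldl (fun g p =>
      pvSetA (pvSetA (pvSetA (pvSetA g p.1 p.2) p.1 (p.2 + 1)) (p.1 + 1) p.2) (p.1 + 1) (p.2 + 1)) g0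
    -- for i in range(m): cnt += board[i].count("0")
    let cnt1 := (List.range m.toNat).foldl (fun c i => c + ((g1.getD i []).count '0' : Int)) cnt
    let rev := g1.reverse
    -- transpose (rows reversed first)
    let horizontal :=
      (List.range n.toNat).foldl (fun acc j =>
        acc ++ [(List.range m.toNat).foldl (fun v i => v ++ [pvCellA rev i j]) ([] : List Char)])
        ([] : List (List Char))
    -- drop "0"s, pad with "1"  (the loop rewrites each of the n columns in place)
    let horizontal2 := horizontal.map (fun col => pvPadA m.toNat (pvRemZeroA col.length col))
    -- transpose back
    let result :=
      (List.range m.toNat).foldl (fun acc i =>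
        acc ++ [(List.range n.toNat).foldl (fun v j => v ++ [pvCellA horizontal2 j i]) ([] : List Char)])
        ([] : List (List Char))
    let result := result.reverse
    -- for i in range(0,m): result[i] = ''.join(result[i])
    (result.map (fun r => String.ofList r), cnt1, true)

-- ===== PORT B =====
def pvCellB (g : List (List Char)) (i j : Nat) : Char := (g.getD i []).getD j ' '

def func_alt (m : Int) (n : Int) (board : List String) (cnt : Int) : List String × Int × Bool :=
  let grid : List (List Char) := board.map (fun row => row.toList)
  -- removed = set of all four cells of every 2x2 match
  let removed : PySem.Set (Nat × Nat) :=
    (List.range (m - 1).toNat).foldl (fun s i =>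
      (List.range (n - 1).toNat).foldl (fun s j =>
        let c := pvCellB grid i j
        if c ≠ '1' ∧ c = pvCellB grid i (j + 1) ∧ c = pvCellB grid (i + 1) j ∧ c = pvCellB grid (i + 1) (j + 1) then
          PySem.Set.update s [(i, j), (i, j + 1), (i + 1, j), (i + 1, j + 1)]
        else s) s) PySem.Set.empty
  if removed = [] then (board, cnt, false)
  else
    -- functional rebuild: a cell is "0" iff it is in removed
    let grid2 :=
      (List.range m.toNat).map (fun i =>
        (List.range n.toNat).map (fun j =>
          if PySem.Set.contains removed (i, j) then '0' else pvCellB grid i j))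
    -- cnt += sum(row.count("0") for row in grid)
    let cnt1 := cnt + (grid2.map (fun r => (r.count '0' : Int))).sum
    -- per-column gravity: bottom-up survivors, then "1"-padding
    let cols :=
      (List.range n.toNat).map (fun j =>
        let keep :=
          ((List.range m.toNat).reverse.filter (fun i => pvCellB grid2 i j ≠ '0')).map
            (fun i => pvCellB grid2 i j)
        keep ++ List.replicate (m.toNat - keep.length) '1')
    -- result rows assembled by direct index arithmetic: row i, col j is cols[j][m-1-i]
    let result :=
      (List.range m.toNat).map (fun i =>
        String.ofList ((List.range n.toNat).map (fun j => pvCellB cols j (m.toNat - 1 - i))))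
    (result, cnt1, true)

-- ===== PRECONDITION & SPEC =====
def pvCellPre (board : List String) (i j : Nat) : Char := (board.getD i "").toList.getD j ' '

-- Pre_ admits (a) m <= 0, where A scans nothing and returns the board unchanged, and (b) the
-- function's m x n-grid contract (m = number of rows, every row of width n; otherwise A
-- indexes/counts a malformed grid) with at least one 2x2 match; it excludes boards with at least
-- one row and no 2x2 match, on which A returns its rows as lists of characters - a value outside
-- the declared return type List String.
def Pre_func (m : Int) (n : Int) (board : List String) (cnt : Int) : Prop :=
  m ≤ 0 ∨
  (m = (board.length : Int) ∧ (∀ s ∈ board, (s.length : Int) = n) ∧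
    ∃ i < board.length, ∃ j < n.toNat, i + 1 < board.length ∧ j + 1 < n.toNat ∧
      pvCellPre board i j ≠ '1' ∧ pvCellPre board i j = pvCellPre board i (j + 1) ∧
      pvCellPre board i j = pvCellPre board (i + 1) j ∧
      pvCellPre board i j = pvCellPre board (i + 1) (j + 1))
instance (m : Int) (n : Int) (board : List String) (cnt : Int) : Decidable (Pre_func m n board cnt) := by
  unfold Pre_func; infer_instance

def pvWitness_func : Int × Int × List String × Int := (2, 2, ["aa", "aa"], 0)

def Spec_func (m : Int) (n : Int) (board : List String) (cnt : Int) (out : List String × Int × Bool) : Prop := out = func_alt m n board cnt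
instance (m : Int) (n : Int) (board : List String) (cnt : Int) (out : List String × Int × Bool) : Decidable (Spec_func m n board cnt out) := by unfold Spec_func; infer_instance

-- ===== CLAIM (what is proved, stated in full; the proofs are below) =====
def Claim_equal_func : Prop := ∀ (m : Int) (n : Int) (board : List String) (cnt : Int), Dom_func m n board cnt → Pre_func m n board cnt → Spec_func m n board cnt (func m n board cnt)

-- ===== LEMMAS AND PROOFS =====

-- the 2x2-match condition, as a Bool, and the four cells of a match
def pvCondB (g : List (List Char)) (i j : Nat) : Bool :=
  decide (pvCellA g i j ≠ '1' ∧ pvCellA g i j = pvCellA g i (j + 1) ∧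
    pvCellA g i j = pvCellA g (i + 1) j ∧ pvCellA g i j = pvCellA g (i + 1) (j + 1))

def pvFour (p : Nat × Nat) : List (Nat × Nat) :=
  [p, (p.1, p.2 + 1), (p.1 + 1, p.2), (p.1 + 1, p.2 + 1)]

-- a cell is removed iff it belongs to the four cells of some match
def pvCov (g : List (List Char)) (I J : Nat) (x : Nat × Nat) : Prop :=
  ∃ i < I, ∃ j < J, pvCondB g i j = true ∧ x ∈ pvFour (i, j)

-- column j of a grid, top to bottom
def pvCol (g : List (List Char)) (j : Nat) : List Char := g.map (fun r => r.getD j ' ')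

theorem pvCellB_eq_pvCellA : @pvCellB = @pvCellA := rfl

theorem cellPre_eq (board : List String) (i j : Nat) :
    pvCellPre board i j = pvCellA (board.map String.toList) i j := by
  simp [pvCellPre, pvCellA, List.getD]
  cases h : board[i]? <;> simp

theorem length_pvSetA (g : List (List Char)) (i j : Nat) : (pvSetA g i j).length = g.length := by
  simp [pvSetA]

theorem getD_pvSetA (g : List (List Char)) (i j a : Nat) :
    ((pvSetA g i j).getD a []).length = (g.getD a []).length := by
  simp only [pvSetA, List.getD]
  rcases Nat.lt_or_ge a g.length with h | h
  · rw [List.getElem?_modify]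
    cases hg : g[a]? <;> simp
    split <;> simp
  · rw [List.getElem?_eq_none (by simpa using h), List.getElem?_eq_none (by simpa using h)]

theorem cell_pvSetA (g : List (List Char)) (i j a b : Nat) :
    pvCellA (pvSetA g i j) a b =
      if i = a ∧ j = b ∧ a < g.length ∧ b < (g.getD a []).length then '0' else pvCellA g a b := by
  simp only [pvCellA, pvSetA, List.getD_eq_getElem?_getD, List.getElem?_modify]
  rcases Nat.lt_or_ge a g.length with hal | hal
  · rw [List.getElem?_eq_getElem hal]
    simp only [Option.map_eq_map, Option.map_some, Option.getD_some]
    by_cases hia : i = a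
    · subst hia
      rw [if_pos rfl, List.getElem?_set]
      by_cases hjb : j = b
      · subst hjb
        by_cases hrow : j < g[i].length
        · simp [hrow, hal]
        · simp [hrow]
      · simp [hjb]
    · simp [hia]
  · rw [show g[a]? = none from List.getElem?_eq_none (by omega)]
    simp [show ¬ a < g.length by omega]

-- a fold of single-cell zero-writes: length and row lengths are preserved
theorem length_foldl_set (ws : List (Nat × Nat)) (g : List (List Char)) :
    (ws.foldl (fun g q => pvSetA g q.1 q.2) g).length = g.length := by
  induction ws generalizing g with
  | nil => rfl
  | cons q t ih => simp [List.foldl_cons, ih, length_pvSetA]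

theorem getD_foldl_set (ws : List (Nat × Nat)) (g : List (List Char)) (a : Nat) :
    ((ws.foldl (fun g q => pvSetA g q.1 q.2) g).getD a []).length = (g.getD a []).length := by
  induction ws generalizing g with
  | nil => rfl
  | cons q t ih => rw [List.foldl_cons, ih, getD_pvSetA]

-- value of a cell after a fold of in-range zero-writes
theorem cell_foldl_set (ws : List (Nat × Nat)) (g : List (List Char))
    (hws : ∀ p ∈ ws, p.1 < g.length ∧ p.2 < (g.getD p.1 []).length) (a b : Nat) :
    pvCellA (ws.foldl (fun g q => pvSetA g q.1 q.2) g) a b =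
      if (a, b) ∈ ws then '0' else pvCellA g a b := by
  induction ws generalizing g with
  | nil => simp
  | cons q t ih =>
    obtain ⟨q1, q2⟩ := q
    have hq := hws (q1, q2) List.mem_cons_self
    have ht : ∀ p ∈ t, p.1 < (pvSetA g q1 q2).length ∧
        p.2 < ((pvSetA g q1 q2).getD p.1 []).length := by
      intro p hp
      have h := hws p (List.mem_cons_of_mem _ hp)
      exact ⟨by rw [length_pvSetA]; exact h.1, by rw [getD_pvSetA]; exact h.2⟩
    rw [List.foldl_cons, ih _ ht, cell_pvSetA]
    by_cases hmem : ((a : Nat), (b : Nat)) ∈ t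
    · simp [hmem]
    · by_cases hqa : (q1, q2) = ((a : Nat), (b : Nat))
      · obtain ⟨rfl, rfl⟩ : q1 = a ∧ q2 = b := by simpa using hqa
        rw [if_neg hmem, if_pos ⟨rfl, rfl, hq.1, hq.2⟩, if_pos List.mem_cons_self]
      · have hne : ¬(q1 = a ∧ q2 = b ∧ a < g.length ∧ b < (g.getD a []).length) := by
          rintro ⟨rfl, rfl, -⟩; exact hqa rfl
        have hnm : ((a : Nat), (b : Nat)) ∉ ((q1, q2) :: t) := by
          intro h
          rcases List.mem_cons.mp h with h | h
          · exact hqa h.symm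
          · exact hmem h
        rw [if_neg hmem, if_neg hne, if_neg hnm]

-- A's per-match 4-cell writes, flattened to single-cell writes
theorem foldl_set4_eq (xs : List (Nat × Nat)) (g : List (List Char)) :
    xs.foldl (fun g p =>
        pvSetA (pvSetA (pvSetA (pvSetA g p.1 p.2) p.1 (p.2 + 1)) (p.1 + 1) p.2) (p.1 + 1) (p.2 + 1)) g
      = (xs.flatMap pvFour).foldl (fun g q => pvSetA g q.1 q.2) g := by
  induction xs generalizing g with
  | nil => rfl
  | cons p t ih => simp [List.foldl_cons, pvFour, ih]

-- A's scan loop = flatMap/filter form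
theorem xyA_eq (g : List (List Char)) (I J : Nat) :
    (List.range I).foldl (fun acc i =>
        (List.range J).foldl (fun acc j =>
          if pvCellA g i j = '1' then acc
          else if pvCellA g i j = pvCellA g i (j + 1) ∧ pvCellA g i j = pvCellA g (i + 1) j ∧
              pvCellA g i j = pvCellA g (i + 1) (j + 1) then acc ++ [(i, j)]
          else acc) acc) ([] : List (Nat × Nat))
      = (List.range I).flatMap (fun i =>
          ((List.range J).filter (fun j => pvCondB g i j)).map (fun j => (i, j))) := by
  have hin : ∀ (i : Nat) (acc : List (Nat × Nat)),
      (List.range J).foldl (fun acc j =>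
          if pvCellA g i j = '1' then acc
          else if pvCellA g i j = pvCellA g i (j + 1) ∧ pvCellA g i j = pvCellA g (i + 1) j ∧
              pvCellA g i j = pvCellA g (i + 1) (j + 1) then acc ++ [(i, j)]
          else acc) acc
        = acc ++ ((List.range J).filter (fun j => pvCondB g i j)).map (fun j => (i, j)) := by
    intro i acc
    rw [show (fun (acc : List (Nat × Nat)) j =>
          if pvCellA g i j = '1' then acc
          else if pvCellA g i j = pvCellA g i (j + 1) ∧ pvCellA g i j = pvCellA g (i + 1) j ∧
              pvCellA g i j = pvCellA g (i + 1) (j + 1) then acc ++ [(i, j)]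
          else acc)
        = (fun (acc : List (Nat × Nat)) j => if pvCondB g i j then acc ++ [(i, j)] else acc) by
      funext acc j
      by_cases h1 : pvCellA g i j = '1'
      · rw [if_pos h1]
        simp [pvCondB, h1]
      · by_cases h2 : pvCellA g i j = pvCellA g i (j + 1) ∧ pvCellA g i j = pvCellA g (i + 1) j ∧
            pvCellA g i j = pvCellA g (i + 1) (j + 1)
        · have hc : pvCondB g i j = true := by
            simp only [pvCondB, decide_eq_true_eq]; exact ⟨h1, h2⟩
          rw [if_neg h1, if_pos h2, hc]; simp
        · have hc : pvCondB g i j = false := by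
            simp only [pvCondB, decide_eq_false_iff_not]
            rintro ⟨-, hh⟩; exact h2 hh
          rw [if_neg h1, if_neg h2, hc]; simp]
    exact PySem.List.foldl_append_if _ _ _ _
  simp only [hin]
  exact PySem.List.foldl_append_eq_flatMap _ _ _

-- membership in B's removed set
theorem memB_inner (g : List (List Char)) (i : Nat) (J : List Nat)
    (s : PySem.Set (Nat × Nat)) (x : Nat × Nat) :
    x ∈ J.foldl (fun s j =>
        if pvCellB g i j ≠ '1' ∧ pvCellB g i j = pvCellB g i (j + 1) ∧
            pvCellB g i j = pvCellB g (i + 1) j ∧ pvCellB g i j = pvCellB g (i + 1) (j + 1) then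
          PySem.Set.update s [(i, j), (i, j + 1), (i + 1, j), (i + 1, j + 1)]
        else s) s
      ↔ x ∈ s ∨ ∃ j ∈ J, pvCondB g i j = true ∧ x ∈ pvFour (i, j) := by
  induction J generalizing s with
  | nil => simp
  | cons j t ih =>
    rw [List.foldl_cons]
    by_cases hc : pvCellB g i j ≠ '1' ∧ pvCellB g i j = pvCellB g i (j + 1) ∧
        pvCellB g i j = pvCellB g (i + 1) j ∧ pvCellB g i j = pvCellB g (i + 1) (j + 1)
    · have hcb : pvCondB g i j = true := by
        simp only [pvCondB, decide_eq_true_eq]; exact hc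
      rw [if_pos hc, ih]
      constructor
      · rintro (h | ⟨j', hj', h'⟩)
        · rcases (PySem.Set.mem_update _ _ _).mp h with h | h
          · exact Or.inl h
          · exact Or.inr ⟨j, List.mem_cons_self, hcb, h⟩
        · exact Or.inr ⟨j', List.mem_cons_of_mem _ hj', h'⟩
      · rintro (h | ⟨j', hj', h'⟩)
        · exact Or.inl ((PySem.Set.mem_update _ _ _).mpr (Or.inl h))
        · rcases List.mem_cons.mp hj' with rfl | hj'
          · exact Or.inl ((PySem.Set.mem_update _ _ _).mpr (Or.inr h'.2))
          · exact Or.inr ⟨j', hj', h'⟩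
    · have hcb : pvCondB g i j = false := by
        simp only [pvCondB, decide_eq_false_iff_not]; exact hc
      rw [if_neg hc, ih]
      constructor
      · rintro (h | ⟨j', hj', h'⟩)
        · exact Or.inl h
        · exact Or.inr ⟨j', List.mem_cons_of_mem _ hj', h'⟩
      · rintro (h | ⟨j', hj', h'⟩)
        · exact Or.inl h
        · rcases List.mem_cons.mp hj' with rfl | hj'
          · rw [hcb] at h'; exact absurd h'.1 (by simp)
          · exact Or.inr ⟨j', hj', h'⟩

theorem memB_outer (g : List (List Char)) (I J : List Nat)
    (s : PySem.Set (Nat × Nat)) (x : Nat × Nat) :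
    x ∈ I.foldl (fun s i => J.foldl (fun s j =>
        if pvCellB g i j ≠ '1' ∧ pvCellB g i j = pvCellB g i (j + 1) ∧
            pvCellB g i j = pvCellB g (i + 1) j ∧ pvCellB g i j = pvCellB g (i + 1) (j + 1) then
          PySem.Set.update s [(i, j), (i, j + 1), (i + 1, j), (i + 1, j + 1)]
        else s) s) s
      ↔ x ∈ s ∨ ∃ i ∈ I, ∃ j ∈ J, pvCondB g i j = true ∧ x ∈ pvFour (i, j) := by
  induction I generalizing s with
  | nil => simp
  | cons i t ih =>
    rw [List.foldl_cons, ih, memB_inner]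
    simp only [List.mem_cons]
    constructor
    · rintro ((h | ⟨j, hj, h⟩) | ⟨i', hi', h⟩)
      · exact Or.inl h
      · exact Or.inr ⟨i, Or.inl rfl, j, hj, h⟩
      · exact Or.inr ⟨i', Or.inr hi', h⟩
    · rintro (h | ⟨i', (rfl | hi'), h⟩)
      · exact Or.inl (Or.inl h)
      · exact Or.inl (Or.inr h)
      · exact Or.inr ⟨i', hi', h⟩

-- counting loop = sum of per-row counts
theorem map_getD_range (l : List (List Char)) :
    (List.range l.length).map (fun i => l.getD i []) = l := by
  apply List.ext_getElem (by simp)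
  intro i h1 h2
  simp [List.getD_eq_getElem?_getD, List.getElem?_eq_getElem h2]

theorem foldl_count (l : List (List Char)) (c0 : Int) :
    (List.range l.length).foldl (fun c i => c + ((l.getD i []).count '0' : Int)) c0
      = c0 + (l.map (fun r => (r.count '0' : Int))).sum := by
  have h1 : (List.range l.length).foldl (fun c i => c + ((l.getD i []).count '0' : Int)) c0
      = ((List.range l.length).map (fun i => l.getD i [])).foldl
          (fun c r => c + ((r.count '0' : Int))) c0 := by
    rw [List.foldl_map]
  rw [h1, map_getD_range, PySem.List.foldl_add]

-- while "0" in l: l.remove("0")   (fuel = initial length bounds the number of removals)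
-- while "0" in l: l.remove("0")  =  filter
theorem filter_erase (c : Char) (l : List Char) :
    (l.erase c).filter (fun x => x ≠ c) = l.filter (fun x => x ≠ c) := by
  induction l with
  | nil => simp
  | cons x xs ih =>
    by_cases hx : x = c
    · subst hx
      rw [List.erase_cons_head, List.filter_cons_of_neg (by simp)]
    · rw [List.erase_cons_tail (by simpa using hx), List.filter_cons_of_pos (by simpa using hx),
        List.filter_cons_of_pos (by simpa using hx), ih]

theorem remZero_eq (fuel : Nat) (l : List Char) (h : l.count '0' ≤ fuel) :
    pvRemZeroA fuel l = l.filter (fun x => x ≠ '0') := by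
  induction fuel generalizing l with
  | zero =>
    have h0 : '0' ∉ l := by
      intro hm; have := List.one_le_count_iff.mpr hm; omega
    exact (List.filter_eq_self.mpr
      (by intro a ha; simp only [decide_not, Bool.not_eq_eq_eq_not, Bool.not_true,
            decide_eq_false_iff_not]; rintro rfl; exact h0 ha)).symm
  | succ f ih =>
    cases h' : PySem.List.remove? l '0' with
    | none =>
      have h0 : '0' ∉ l := (PySem.List.remove?_eq_none_iff l '0').mp h'
      rw [pvRemZeroA, h']
      exact (List.filter_eq_self.mpr
        (by intro a ha; simp only [decide_not, Bool.not_eq_eq_eq_not, Bool.not_true,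
              decide_eq_false_iff_not]; rintro rfl; exact h0 ha)).symm
    | some l' =>
      have hm : '0' ∈ l := by
        by_contra h0
        rw [(PySem.List.remove?_eq_none_iff l '0').mpr h0] at h'
        simp at h'
      obtain rfl : l' = l.erase '0' := by
        have h2 := PySem.List.remove?_eq_some_erase l '0' hm
        rw [h'] at h2
        exact Option.some.inj h2
      rw [pvRemZeroA, h']
      have hcnt : (l.erase '0').count '0' ≤ f := by
        have h1 := @List.count_erase_self Char _ _ '0' l
        have h2 := List.one_le_count_iff.mpr hm
        omega
      exact (ih _ hcnt).trans (filter_erase '0' l)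

-- while len(l) < mm: l.append("1")  =  pad with replicate
theorem pad_eq (mm : Nat) (l : List Char) :
    pvPadA mm l = l ++ List.replicate (mm - l.length) '1' := by
  fun_induction pvPadA mm l with
  | case1 l hlt ih =>
    rw [ih]
    have h2 : mm - l.length = (mm - (l.length + 1)) + 1 := by omega
    rw [h2, List.append_assoc]
    congr 1
    simp [List.replicate_succ]
  | case2 l hge =>
    have : mm - l.length = 0 := by omega
    simp [this]

-- map/filter exchange for the survivors of a column
theorem filter_map_col (R : List (List Char)) (j : Nat) (l : List Nat) :
    (l.filter (fun i => pvCellA R i j ≠ '0')).map (fun i => pvCellA R i j)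
      = (l.map (fun i => pvCellA R i j)).filter (fun x => x ≠ '0') := by
  induction l with
  | nil => rfl
  | cons x xs ih =>
    simp only [decide_not] at ih ⊢
    by_cases h : pvCellA R x j = '0' <;> simp [h, ih]

theorem reverse_map_range {α : Type} (M : Nat) (f : Nat → α) :
    ((List.range M).map f).reverse = (List.range M).map (fun i => f (M - 1 - i)) := by
  apply List.ext_getElem (by simp)
  intro i h1 h2
  simp at h1 h2
  rw [List.getElem_reverse]
  simp

-- A's inner transpose loop reads off a column
theorem colfold (g : List (List Char)) (j : Nat) :
    (List.range g.length).foldl (fun v i => v ++ [pvCellA g i j]) ([] : List Char) = pvCol g j := by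
  rw [PySem.List.foldl_append_singleton_eq_map]
  show (List.range g.length).map ((fun r => r.getD j ' ') ∘ (fun i => g.getD i [])) = _
  rw [← List.map_map, map_getD_range, pvCol]


-- proof-side copies of the two else-branches, with m.toNat/n.toNat replaced by g.length/N
def funcCore (g : List (List Char)) (N : Nat) (board : List String) (cnt : Int) :
    List String × Int × Bool :=
  let xy : List (Nat × Nat) :=
    (List.range (g.length - 1)).foldl (fun acc i =>
      (List.range (N - 1)).foldl (fun acc j =>
        if pvCellA g i j = '1' then acc
        else if pvCellA g i j = pvCellA g i (j + 1) ∧ pvCellA g i j = pvCellA g (i + 1) j ∧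
            pvCellA g i j = pvCellA g (i + 1) (j + 1) then acc ++ [(i, j)]
        else acc) acc) []
  if xy = [] then (board, cnt, false)
  else
    let g1 := xy.foldl (fun g p =>
      pvSetA (pvSetA (pvSetA (pvSetA g p.1 p.2) p.1 (p.2 + 1)) (p.1 + 1) p.2) (p.1 + 1) (p.2 + 1)) g
    let cnt1 := (List.range g.length).foldl (fun c i => c + ((g1.getD i []).count '0' : Int)) cnt
    let rev := g1.reverse
    let horizontal :=
      (List.range N).foldl (fun acc j =>
        acc ++ [(List.range g.length).foldl (fun v i => v ++ [pvCellA rev i j]) ([] : List Char)])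
        ([] : List (List Char))
    let horizontal2 := horizontal.map (fun col => pvPadA g.length (pvRemZeroA col.length col))
    let result :=
      (List.range g.length).foldl (fun acc i =>
        acc ++ [(List.range N).foldl (fun v j => v ++ [pvCellA horizontal2 j i]) ([] : List Char)])
        ([] : List (List Char))
    let result := result.reverse
    (result.map (fun r => String.ofList r), cnt1, true)

def altCore (g : List (List Char)) (N : Nat) (board : List String) (cnt : Int) :
    List String × Int × Bool :=
  let removed : PySem.Set (Nat × Nat) :=
    (List.range (g.length - 1)).foldl (fun s i =>
      (List.range (N - 1)).foldl (fun s j =>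
        if pvCellB g i j ≠ '1' ∧ pvCellB g i j = pvCellB g i (j + 1) ∧
            pvCellB g i j = pvCellB g (i + 1) j ∧ pvCellB g i j = pvCellB g (i + 1) (j + 1) then
          PySem.Set.update s [(i, j), (i, j + 1), (i + 1, j), (i + 1, j + 1)]
        else s) s) PySem.Set.empty
  if removed = [] then (board, cnt, false)
  else
    let grid2 :=
      (List.range g.length).map (fun i =>
        (List.range N).map (fun j =>
          if PySem.Set.contains removed (i, j) then '0' else pvCellB g i j))
    let cnt1 := cnt + (grid2.map (fun r => (r.count '0' : Int))).sum
    let cols :=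
      (List.range N).map (fun j =>
        let keep :=
          ((List.range g.length).reverse.filter (fun i => pvCellB grid2 i j ≠ '0')).map
            (fun i => pvCellB grid2 i j)
        keep ++ List.replicate (g.length - keep.length) '1')
    let result :=
      (List.range g.length).map (fun i =>
        String.ofList ((List.range N).map (fun j => pvCellB cols j (g.length - 1 - i))))
    (result, cnt1, true)

theorem colmap (g : List (List Char)) (j : Nat) :
    (List.range g.length).map (fun i => pvCellA g i j) = pvCol g j := by
  show (List.range g.length).map ((fun r => r.getD j ' ') ∘ (fun i => g.getD i [])) = _
  rw [← List.map_map, map_getD_range, pvCol]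

theorem col_reverse (g : List (List Char)) (j : Nat) :
    pvCol g.reverse j = (pvCol g j).reverse := by
  simp [pvCol, List.map_reverse]

theorem mem_xyA (g : List (List Char)) (I J : Nat) (x : Nat × Nat) :
    x ∈ (List.range I).flatMap (fun i =>
        ((List.range J).filter (fun j => pvCondB g i j)).map (fun j => (i, j)))
      ↔ ∃ i < I, ∃ j < J, pvCondB g i j = true ∧ x = (i, j) := by
  constructor
  · intro hx
    rcases List.mem_flatMap.mp hx with ⟨i, hi, hip⟩
    rcases List.mem_map.mp hip with ⟨j, hj, rfl⟩
    rcases List.mem_filter.mp hj with ⟨hjr, hc⟩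
    exact ⟨i, List.mem_range.mp hi, j, List.mem_range.mp hjr, hc, rfl⟩
  · rintro ⟨i, hi, j, hj, hc, rfl⟩
    exact List.mem_flatMap.mpr ⟨i, List.mem_range.mpr hi,
      List.mem_map.mpr ⟨j, List.mem_filter.mpr ⟨List.mem_range.mpr hj, hc⟩, rfl⟩⟩

theorem getElem_eq_cell (L : List (List Char)) (a b : Nat) (h1 : a < L.length)
    (h2 : b < L[a].length) : L[a][b] = pvCellA L a b := by
  simp only [pvCellA, List.getD_eq_getElem?_getD]
  rw [List.getElem?_eq_getElem h1]
  simp only [Option.getD_some]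
  rw [List.getElem?_eq_getElem h2]
  simp only [Option.getD_some]

theorem cell_map_range (M N : Nat) (f : Nat → Nat → Char) (a b : Nat) (ha : a < M) (hb : b < N) :
    pvCellA ((List.range M).map (fun i => (List.range N).map (fun j => f i j))) a b = f a b := by
  simp [pvCellA, List.getD_eq_getElem?_getD, ha, hb]

-- the two zeroed grids coincide
theorem grids_eq (g : List (List Char)) (N : Nat) (hshape : ∀ r ∈ g, r.length = N)
    (xy rm : List (Nat × Nat))
    (hxym : ∀ x, x ∈ xy ↔ ∃ i < g.length - 1, ∃ j < N - 1, pvCondB g i j = true ∧ x = (i, j))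
    (hrmm : ∀ x, x ∈ rm ↔ pvCov g (g.length - 1) (N - 1) x) :
    xy.foldl (fun gg p =>
        pvSetA (pvSetA (pvSetA (pvSetA gg p.1 p.2) p.1 (p.2 + 1)) (p.1 + 1) p.2) (p.1 + 1) (p.2 + 1)) g
      = (List.range g.length).map (fun i =>
          (List.range N).map (fun j =>
            if PySem.Set.contains rm (i, j) then '0' else pvCellB g i j)) := by
  rw [foldl_set4_eq]
  have hrowlen : ∀ a, a < g.length → (g.getD a []).length = N := by
    intro a ha
    rw [List.getD_eq_getElem?_getD, List.getElem?_eq_getElem ha]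
    exact hshape _ (List.getElem_mem ha)
  have hflat : ∀ x, x ∈ xy.flatMap pvFour ↔ pvCov g (g.length - 1) (N - 1) x := by
    intro x
    constructor
    · intro hx
      rcases List.mem_flatMap.mp hx with ⟨p, hp, hxp⟩
      rcases (hxym p).mp hp with ⟨i, hi, j, hj, hc, rfl⟩
      exact ⟨i, hi, j, hj, hc, hxp⟩
    · rintro ⟨i, hi, j, hj, hc, hx⟩
      exact List.mem_flatMap.mpr ⟨(i, j), (hxym _).mpr ⟨i, hi, j, hj, hc, rfl⟩, hx⟩
  have hbounds : ∀ p ∈ xy.flatMap pvFour, p.1 < g.length ∧ p.2 < (g.getD p.1 []).length := by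
    intro p hp
    obtain ⟨p1, p2⟩ := p
    rcases (hflat _).mp hp with ⟨i, hi, j, hj, hc, hx⟩
    simp only [pvFour, List.mem_cons, List.not_mem_nil, or_false, Prod.mk.injEq] at hx
    have h1 : p1 < g.length := by rcases hx with ⟨h, -⟩ | ⟨h, -⟩ | ⟨h, -⟩ | ⟨h, -⟩ <;> omega
    refine ⟨h1, ?_⟩
    rw [hrowlen _ h1]
    rcases hx with ⟨-, h⟩ | ⟨-, h⟩ | ⟨-, h⟩ | ⟨-, h⟩ <;> omega
  set L := (xy.flatMap pvFour).foldl (fun gg q => pvSetA gg q.1 q.2) g with hLdef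
  have hLlen : L.length = g.length := length_foldl_set _ _
  have hLrow : ∀ a, a < g.length → ∀ h : a < L.length, L[a].length = N := by
    intro a ha h
    have := getD_foldl_set (xy.flatMap pvFour) g a
    rw [← hLdef, List.getD_eq_getElem?_getD, List.getElem?_eq_getElem h, Option.getD_some] at this
    rw [this, hrowlen a ha]
  apply List.ext_getElem
  · rw [hLlen]; simp
  · intro a h1 h2
    have ha : a < g.length := by rw [hLlen] at h1; exact h1
    apply List.ext_getElem
    · rw [hLrow a ha h1, List.getElem_map, List.getElem_range]
      simp
    · intro b hb1 hb2
      have hbN : b < N := by rw [hLrow a ha h1] at hb1; exact hb1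
      rw [getElem_eq_cell _ _ _ h1 hb1, getElem_eq_cell _ _ _ h2 hb2, hLdef,
        cell_foldl_set _ _ hbounds,
        cell_map_range g.length N
          (fun i j => if PySem.Set.contains rm (i, j) then '0' else pvCellB g i j) a b ha hbN]
      by_cases hcov : pvCov g (g.length - 1) (N - 1) (a, b)
      · rw [if_pos ((hflat _).mpr hcov),
          if_pos (by rw [PySem.Set.contains_iff]; exact (hrmm _).mpr hcov)]
      · rw [if_neg (fun h => hcov ((hflat _).mp h)),
          if_neg (by rw [PySem.Set.contains_iff]
                     exact fun h => hcov ((hrmm _).mp h))]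
        rfl

theorem core_eq (g : List (List Char)) (N : Nat) (board : List String) (cnt : Int)
    (hshape : ∀ r ∈ g, r.length = N)
    (hex : ∃ i < g.length - 1, ∃ j < N - 1, pvCondB g i j = true) :
    funcCore g N board cnt = altCore g N board cnt := by
  obtain ⟨i0, hi0, j0, hj0, hc0⟩ := hex
  simp only [funcCore, altCore]
  rw [xyA_eq]
  set xs := (List.range (g.length - 1)).flatMap (fun i =>
    ((List.range (N - 1)).filter (fun j => pvCondB g i j)).map (fun j => (i, j))) with hxs
  set rm := (List.range (g.length - 1)).foldl (fun s i =>
    (List.range (N - 1)).foldl (fun s j =>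
      if pvCellB g i j ≠ '1' ∧ pvCellB g i j = pvCellB g i (j + 1) ∧
          pvCellB g i j = pvCellB g (i + 1) j ∧ pvCellB g i j = pvCellB g (i + 1) (j + 1) then
        PySem.Set.update s [(i, j), (i, j + 1), (i + 1, j), (i + 1, j + 1)]
      else s) s) PySem.Set.empty with hrm
  have hxym : ∀ x : Nat × Nat,
      x ∈ xs ↔ ∃ i < g.length - 1, ∃ j < N - 1, pvCondB g i j = true ∧ x = (i, j) := by
    intro x; rw [hxs]; exact mem_xyA g _ _ x
  have hrmm : ∀ x : Nat × Nat, x ∈ rm ↔ pvCov g (g.length - 1) (N - 1) x := by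
    intro x
    rw [hrm, memB_outer]
    simp [pvCov, PySem.Set.empty, List.mem_range]
  have hxy_ne : xs ≠ [] := by
    intro h0
    have hmem := (hxym (i0, j0)).mpr ⟨i0, hi0, j0, hj0, hc0, rfl⟩
    rw [h0] at hmem
    exact List.not_mem_nil hmem
  have hrm_ne : rm ≠ [] := by
    intro h0
    have hmem := (hrmm (i0, j0)).mpr ⟨i0, hi0, j0, hj0, hc0, by simp [pvFour]⟩
    rw [h0] at hmem
    exact List.not_mem_nil hmem
  rw [if_neg hxy_ne, if_neg hrm_ne]
  have hG := grids_eq g N hshape xs rm hxym hrmm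
  rw [hG]
  simp only [pvCellB_eq_pvCellA]
  set R := (List.range g.length).map (fun i =>
    (List.range N).map (fun j =>
      if PySem.Set.contains rm (i, j) then '0' else pvCellA g i j)) with hR
  have hRlen : R.length = g.length := by rw [hR]; simp
  simp only [Prod.mk.injEq]
  refine ⟨?_, ?_, trivial⟩
  · -- result component
    have hcol : ∀ j, (List.range g.length).foldl
        (fun v i => v ++ [pvCellA R.reverse i j]) ([] : List Char) = pvCol R.reverse j := by
      intro j
      rw [show g.length = R.reverse.length by simp [hRlen], colfold]
    simp only [hcol]
    rw [show List.foldl (fun acc j => acc ++ [pvCol R.reverse j]) ([] : List (List Char))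
          (List.range N) = (List.range N).map (fun j => pvCol R.reverse j) from by
        rw [PySem.List.foldl_append_singleton_eq_map, List.nil_append]]
    rw [List.map_map]
    have hrz : ∀ l : List Char, pvRemZeroA l.length l = l.filter (fun x => x ≠ '0') :=
      fun l => remZero_eq _ _ List.count_le_length
    simp only [hrz, pad_eq]
    have hkeep : ∀ j, ((List.range g.length).reverse.filter
          (fun i => pvCellA R i j ≠ '0')).map (fun i => pvCellA R i j)
        = (pvCol R.reverse j).filter (fun x => x ≠ '0') := by
      intro j
      rw [filter_map_col, List.map_reverse, show g.length = R.length from hRlen.symm,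
        colmap, ← col_reverse]
    simp only [hkeep]
    have hrowA : ∀ C : List (List Char), ∀ i, (List.range N).foldl
        (fun v j => v ++ [pvCellA C j i]) ([] : List Char)
        = (List.range N).map (fun j => pvCellA C j i) := by
      intro C i
      rw [PySem.List.foldl_append_singleton_eq_map, List.nil_append]
    simp only [hrowA]
    rw [PySem.List.foldl_append_singleton_eq_map, List.nil_append, List.map_reverse,
      List.map_map, reverse_map_range]
    simp only [Function.comp_def]
  · -- count component
    rw [show g.length = R.length from hRlen.symm]
    exact foldl_count R cnt
-- ===== VERDICT (by name: the statement is the Claim_ definition above) =====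
theorem func_spec : Claim_equal_func := by
  intro m n board cnt _ hpre
  unfold Spec_func
  rcases hpre with hm0 | ⟨hm, hrow, hex⟩
  · simp [func, func_alt, show (m - 1).toNat = 0 by omega]
  · obtain ⟨i0, hi0, j0, hj0, hi1, hj1, hcc⟩ := hex
    simp only [func, func_alt]
    rw [show (m - 1).toNat = (board.map String.toList).length - 1 by simp; omega,
        show m.toNat = (board.map String.toList).length by simp; omega,
        show (n - 1).toNat = n.toNat - 1 by omega,
        show (fun (row : String) => row.toList) = String.toList from rfl]
    show funcCore (board.map String.toList) n.toNat board cnt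
        = altCore (board.map String.toList) n.toNat board cnt
    apply core_eq
    · intro r hr
      obtain ⟨str, hs, rfl⟩ := List.mem_map.mp hr
      have := hrow str hs
      simp only [String.length_toList]
      omega
    · refine ⟨i0, by simp; omega, j0, by omega, ?_⟩
      simp only [pvCondB, decide_eq_true_eq]
      rw [← cellPre_eq, ← cellPre_eq, ← cellPre_eq, ← cellPre_eq]
      exact hcc
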